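-- pv_equiv track=rewrite | github.com/caiotavaresc/OtimizacaoEspacialSus | code/utils.py | normalize_atribuicao
-- ===== SOURCE A (Python) =====
-- def normalize_atribuicao(atribuicao):
--     """
--     Renomeia os grupos conforme ordem de primeira aparição.
--     Ex: [2, 2, 0, 0, 1, 1] → [0, 0, 1, 1, 2, 2]
--     """
--     mapa = {}
--     proximo_grupo = 0
--     atribuicao_normalizada = []
--
--     for g in atribuicao:
--         if g not in mapa:
--             mapa[g] = proximo_grupo
--             proximo_grupo += 1
--         atribuicao_normalizada.append(mapa[g])
--
--     return atribuicao_normalizada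
-- ===== SOURCE B (Python) =====
-- def normalize_atribuicao(atribuicao):
--     """
--     Renomeia os grupos conforme ordem de primeira aparicao.
--     Sem dicionario: o rotulo de g e o numero de valores distintos que
--     aparecem antes da primeira ocorrencia de g.
--     """
--     return [len(set(atribuicao[:atribuicao.index(g)])) for g in atribuicao]
-- ===== Notes on version B (the rewrite author's own statement) =====
-- stated objective: alternative
-- what changed: A builds a label dictionary in one stateful pass; B drops the dictionary entirely and computes each label independently as the count of distinct values in the prefix before the element's first occurrence (len(set(a[:a.index(g)]))), trading O(n) for a stateless quadratic per-element formulation.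
import Mathlib
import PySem

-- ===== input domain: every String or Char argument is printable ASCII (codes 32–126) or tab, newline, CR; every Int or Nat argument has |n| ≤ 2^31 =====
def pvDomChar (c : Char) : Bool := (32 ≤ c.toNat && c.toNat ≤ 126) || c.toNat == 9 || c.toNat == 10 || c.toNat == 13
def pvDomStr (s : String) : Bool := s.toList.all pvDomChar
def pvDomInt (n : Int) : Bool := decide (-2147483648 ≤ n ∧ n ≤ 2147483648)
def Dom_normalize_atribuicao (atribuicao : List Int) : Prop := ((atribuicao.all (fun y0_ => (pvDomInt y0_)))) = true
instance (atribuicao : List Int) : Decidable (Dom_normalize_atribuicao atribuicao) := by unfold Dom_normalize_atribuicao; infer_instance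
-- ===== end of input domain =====

-- B drops A's label dictionary: each label is computed independently as the number of
-- distinct values before the element's first occurrence; objective: alternative (stateless, quadratic).

-- ===== PORT A =====
-- loop body of A: possibly extend (mapa, proximo_grupo), then append mapa[g]
-- (mapa[g] cannot raise KeyError here — g was just inserted if absent — so getD is exact)
def pvStepA (st : PySem.Dict Int Int × Int × List Int) (g : Int) :
    PySem.Dict Int Int × Int × List Int :=
  let st2 := if st.1.contains g then (st.1, st.2.1) else (st.1.insert g st.2.1, st.2.1 + 1)
  (st2.1, st2.2, st.2.2 ++ [st2.1.getD g 0])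

def normalize_atribuicao (atribuicao : List Int) : List Int :=
  (atribuicao.foldl pvStepA (PySem.Dict.empty, 0, [])).2.2

-- ===== PORT B =====
-- [len(set(atribuicao[:atribuicao.index(g)])) for g in atribuicao]
-- atribuicao.index(g) never raises here (g is drawn from atribuicao), so .getD 0 is exact
def normalize_atribuicao_alt (atribuicao : List Int) : List Int :=
  atribuicao.map (fun g =>
    ((PySem.Set.ofList
        (PySem.List.slice atribuicao none
          (some (((PySem.List.index? atribuicao g).getD 0 : Nat) : Int)))).length : Int))

-- ===== PRECONDITION & SPEC =====
def Spec_normalize_atribuicao (atribuicao : List Int) (out : List Int) : Prop := out = normalize_atribuicao_alt atribuicao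
instance (atribuicao : List Int) (out : List Int) : Decidable (Spec_normalize_atribuicao atribuicao out) := by unfold Spec_normalize_atribuicao; infer_instance

-- ===== CLAIM (what is proved, stated in full; the proofs are below) =====
def Claim_equal_normalize_atribuicao : Prop := ∀ (atribuicao : List Int), Dom_normalize_atribuicao atribuicao → Spec_normalize_atribuicao atribuicao (normalize_atribuicao atribuicao)

-- ===== LEMMAS AND PROOFS =====

-- the table A builds over a seen-list s, as a function of s (proof-only helper)
def pvMapaA (s : List Int) : PySem.Dict Int Int :=
  (PySem.List.enumerate s 0).foldl (fun d p => d.insert p.2 p.1) PySem.Dict.empty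

theorem contains_pvMapaA (s : List Int) (g : Int) :
    (pvMapaA s).contains g = s.contains g := by
  rw [PySem.Dict.contains_eq_decide_mem_keys]
  unfold pvMapaA
  rw [PySem.Dict.keys_foldl_insert_key (key := Prod.snd) (f := fun _ p => p.1)]
  simp [PySem.List.map_snd_enumerate]

theorem pvMapaA_append_singleton (s : List Int) (g : Int) :
    pvMapaA (s ++ [g]) = (pvMapaA s).insert g (s.length : Int) := by
  unfold pvMapaA
  rw [PySem.List.enumerate_append, List.foldl_append]
  simp [PySem.List.enumerate_cons, PySem.List.enumerate_nil]

theorem getD_pvMapaA_append (s t : List Int) (g : Int) (h : ∀ x ∈ t, x ≠ g) :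
    (pvMapaA (s ++ t)).getD g 0 = (pvMapaA s).getD g 0 := by
  induction t using List.reverseRecOn with
  | nil => simp
  | append_singleton t' x ih =>
      rw [← List.append_assoc, pvMapaA_append_singleton,
        PySem.Dict.getD_insert_of_ne _ _ _ (Ne.symm (h x (by simp)))]
      exact ih (fun y hy => h y (by simp [hy]))

theorem getD_pvMapaA_update (s t : List Int) (g : Int) (hg : g ∈ s) :
    (pvMapaA (PySem.Set.update s t)).getD g 0 = (pvMapaA s).getD g 0 := by
  rw [PySem.Set.update_eq_append_filter]
  apply getD_pvMapaA_append
  intro x hx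
  rcases List.mem_filter.mp hx with ⟨-, hc⟩
  intro hxg
  subst hxg
  simp at hc
  exact hc hg

-- loop invariant of A's pass
theorem loopA (rest : List Int) : ∀ (seen acc : List Int),
    (List.foldl pvStepA (pvMapaA seen, (seen.length : Int), acc) rest).2.2
      = acc ++ rest.map (fun g => (pvMapaA (PySem.Set.update seen rest)).getD g 0) := by
  induction rest with
  | nil => intro seen acc; simp [PySem.Set.update_nil]
  | cons g rest' ih =>
      intro seen acc
      by_cases hg : g ∈ seen
      · have hc : (pvMapaA seen).contains g = true := by
          rw [contains_pvMapaA]; exact List.contains_iff_mem.mpr hg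
        have hstep : pvStepA (pvMapaA seen, (seen.length : Int), acc) g
            = (pvMapaA seen, (seen.length : Int), acc ++ [(pvMapaA seen).getD g 0]) := by
          simp [pvStepA, hc]
        rw [List.foldl_cons, hstep, ih]
        rw [PySem.Set.update_cons, PySem.Set.add_of_mem hg]
        simp [getD_pvMapaA_update seen rest' g hg]
      · have hc : (pvMapaA seen).contains g = false := by
          rw [contains_pvMapaA]
          simp [hg]
        have hstep : pvStepA (pvMapaA seen, (seen.length : Int), acc) g
            = (pvMapaA (seen ++ [g]), ((seen ++ [g]).length : Int),
               acc ++ [(seen.length : Int)]) := by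
          simp [pvStepA, hc, pvMapaA_append_singleton, PySem.Dict.getD_insert_self]
        rw [List.foldl_cons, hstep, ih]
        rw [PySem.Set.update_cons, PySem.Set.add_of_not_mem hg]
        have hmem : g ∈ seen ++ [g] := by simp
        simp [getD_pvMapaA_update (seen ++ [g]) rest' g hmem,
          pvMapaA_append_singleton, PySem.Dict.getD_insert_self]

-- first-occurrence decomposition delivered by list.index
theorem index?_decomp (a : List Int) (g : Int) (hg : g ∈ a) :
    ∃ pre suf, a = pre ++ g :: suf ∧ PySem.List.index? a g = some pre.length ∧ g ∉ pre := by
  induction a with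
  | nil => cases hg
  | cons x t ih =>
      by_cases hx : x = g
      · subst hx
        exact ⟨[], t, rfl, PySem.List.index?_cons_self x t, by simp⟩
      · have hgt : g ∈ t := by
          rcases List.mem_cons.mp hg with h | h
          · exact absurd h.symm hx
          · exact h
        obtain ⟨pre, suf, hdec, hidx, hgp⟩ := ih hgt
        refine ⟨x :: pre, suf, by simp [hdec], ?_, by simp [hgp, Ne.symm hx]⟩
        rw [PySem.List.index?_cons_of_ne t hx, hidx]
        simp
-- the value A's table assigns to g, read off from a decomposition with g ∉ pre
theorem getD_pvMapaA_of_decomp (suf : List Int) : ∀ (pre : List Int) (g : Int),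
    g ∉ pre → g ∉ suf →
    (pvMapaA (pre ++ g :: suf)).getD g 0 = (pre.length : Int) := by
  intro pre g hgp hgs
  rw [show pre ++ g :: suf = (pre ++ [g]) ++ suf by simp]
  rw [getD_pvMapaA_append (pre ++ [g]) suf g (by intro x hx hxg; subst hxg; exact hgs hx)]
  rw [pvMapaA_append_singleton, PySem.Dict.getD_insert_self]

-- ===== VERDICT (by name: the statement is the Claim_ definition above) =====
theorem normalize_atribuicao_spec : Claim_equal_normalize_atribuicao := by
  intro a _
  unfold Spec_normalize_atribuicao normalize_atribuicao normalize_atribuicao_alt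
  have h0 : (PySem.Dict.empty : PySem.Dict Int Int) = pvMapaA [] := rfl
  rw [h0]
  have hl := loopA a [] []
  rw [show ((0 : Int) = (([] : List Int).length : Int)) from rfl, hl]
  simp only [List.nil_append]
  apply List.map_congr_left
  intro g hg
  obtain ⟨pre, suf, hdec, hidx, hgp⟩ := index?_decomp a g hg
  -- B side: the slice atribuicao[:index(g)] is exactly pre
  rw [hidx, Option.getD_some, PySem.List.slice_to_natCast, hdec, List.take_left]
  -- A side: the map built over set(a) (= dedup a) sends g to the distinct count of pre
  rw [PySem.Set.update_nil_left, PySem.Set.ofList_append, PySem.Set.update_eq_append_filter]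
  have hgo : g ∉ PySem.Set.ofList pre := fun h => hgp ((PySem.Set.mem_ofList _ _).mp h)
  have hofc : PySem.Set.ofList (g :: suf) = g :: PySem.Set.discard (PySem.Set.ofList suf) g :=
    PySem.Set.ofList_cons g suf
  rw [hofc]
  have hfilter : (g :: PySem.Set.discard (PySem.Set.ofList suf) g).filter
        (fun y => !(PySem.Set.contains (PySem.Set.ofList pre) y))
      = g :: (PySem.Set.discard (PySem.Set.ofList suf) g).filter
        (fun y => !(PySem.Set.contains (PySem.Set.ofList pre) y)) := by
    rw [List.filter_cons_of_pos (by simp [hgo])]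
  rw [hfilter]
  rw [getD_pvMapaA_of_decomp _ _ _ hgo (by
    intro hmem
    rcases List.mem_filter.mp hmem with ⟨hmem2, -⟩
    exact ((PySem.Set.mem_discard _ _ _).mp hmem2).2 rfl)]
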